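-- pv_equiv track=rewrite | github.com/kaiusvg/simplificar | simplificacao.py | remover_simbolos_inalcancaveis
-- ===== SOURCE A (Python) =====
-- def remover_simbolos_inalcancaveis(gr):
--     alcancaveis = set()
--     alcancaveis.add("S")
--
--     alterado = True
--     while alterado:
--         alterado = False
--         for nt in list(alcancaveis):
--             if nt in gr:
--                 for r in gr[nt]:
--                     for simbolo in r:
--                         if simbolo.isupper() and simbolo not in alcancaveis:
--                             alcancaveis.add(simbolo)
--                             alterado = True
--
--     return {nt: regras for nt, regras in gr.items() if nt in alcancaveis}
-- ===== SOURCE B (Python) =====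
-- def remover_simbolos_inalcancaveis(gr):
--     # Precompute each nonterminal's uppercase-successor list once, then a recursive
--     # depth-first search marks every nonterminal reachable from "S" exactly once.
--     succ = {nt: [s for r in regras for s in r if s.isupper()] for nt, regras in gr.items()}
--     alcancaveis = set()
--
--     def dfs(nt):
--         alcancaveis.add(nt)
--         for s in succ.get(nt, []):
--             if s not in alcancaveis:
--                 dfs(s)
--
--     dfs("S")
--     return {nt: regras for nt, regras in gr.items() if nt in alcancaveis}
-- ===== Notes on version B (the rewrite author's own statement) =====
-- stated objective: alternative
-- what changed: Replaced the rescan-until-no-change fixpoint over the whole reachable set (re-scanning every production's characters each round) with a precomputed uppercase-successor adjacency dict followed by a recursive depth-first search that visits each nonterminal once.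
import Mathlib
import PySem

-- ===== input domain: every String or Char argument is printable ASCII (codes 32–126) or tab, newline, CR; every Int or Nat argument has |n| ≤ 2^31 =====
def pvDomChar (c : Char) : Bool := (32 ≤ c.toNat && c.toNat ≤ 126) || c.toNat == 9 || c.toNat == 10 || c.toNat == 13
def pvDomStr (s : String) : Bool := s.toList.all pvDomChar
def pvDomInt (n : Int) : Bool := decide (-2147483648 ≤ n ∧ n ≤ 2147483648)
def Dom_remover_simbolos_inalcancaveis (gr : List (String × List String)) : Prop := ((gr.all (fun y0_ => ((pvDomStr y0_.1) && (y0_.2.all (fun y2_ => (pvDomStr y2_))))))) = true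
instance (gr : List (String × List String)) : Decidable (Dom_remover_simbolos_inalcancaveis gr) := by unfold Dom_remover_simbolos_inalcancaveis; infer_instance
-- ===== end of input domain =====

-- B replaces A's rescan-the-whole-set-until-unchanged fixpoint loop by a precomputed
-- uppercase-successor adjacency dict plus a recursive depth-first search that visits each
-- nonterminal once (objective: alternative algorithm).

-- ===== PORT A =====
-- All upper-case symbol occurrences of all productions, as 1-char strings.  Used only as a
-- fuel bound for the while-loop: every iteration of A's while that sets 'alterado' adds at
-- least one of these symbols (or stops), so |pvUniv d| + 2 rounds always reach the fixpoint.
def pvUniv (d : PySem.Dict String (List String)) : List String :=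
  d.items.flatMap (fun p =>
    p.2.flatMap (fun r => (r.toList.filter PySem.Chars.isupper).map (fun c => String.ofList [c])))

-- body of 'for nt in list(alcancaveis)': 'if nt in gr: for r in gr[nt]: …' as one lookup
def pvScanA (d : PySem.Dict String (List String))
    (acc : PySem.Set String × Bool) (nt : String) : PySem.Set String × Bool :=
  match d.get? nt with
  | none => acc
  | some rs =>
      rs.foldl (fun acc r =>
        r.toList.foldl (fun acc c =>
          if PySem.Chars.isupper c && !(PySem.Set.contains acc.1 (String.ofList [c])) then
            (PySem.Set.add acc.1 (String.ofList [c]), true)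
          else acc) acc) acc

-- 'while alterado:' — fold over the snapshot list(alcancaveis) while the live set evolves
def pvWhileA (d : PySem.Dict String (List String)) :
    Nat → PySem.Set String → PySem.Set String
  | 0, alc => alc
  | fuel+1, alc =>
      let p := alc.foldl (pvScanA d) (alc, false)
      if p.2 then pvWhileA d fuel p.1 else p.1

def remover_simbolos_inalcancaveis (gr : List (String × List String)) : List (String × List String) :=
  let d := PySem.Dict.ofList gr
  let alc := pvWhileA d ((pvUniv d).length + 2) (PySem.Set.add PySem.Set.empty "S")
  -- the dict comprehension over gr.items(): d.items has pairwise-distinct keys, so the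
  -- built dict's items are exactly the kept pairs in order
  d.items.filter (fun p => PySem.Set.contains alc p.1)

-- ===== PORT B =====
-- '[s for r in regras for s in r if s.isupper()]'
def pvBSyms (regras : List String) : List String :=
  regras.flatMap (fun r => (r.toList.filter PySem.Chars.isupper).map (fun c => String.ofList [c]))

-- 'succ = {nt: [...] for nt, regras in gr.items()}'
def pvBSucc (gr : List (String × List String)) : PySem.Dict String (List String) :=
  (PySem.Dict.ofList gr).items.foldl (fun sd p => sd.insert p.1 (pvBSyms p.2)) PySem.Dict.empty

-- 'def dfs(nt): alcancaveis.add(nt); for s in succ.get(nt, []): if s not in alcancaveis: dfs(s)'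
-- fuel bounds the recursion depth: every call is on a symbol not yet visited and immediately
-- adds it, and every visited symbol is "S" or occurs in some successor list.
def pvDfs (sd : PySem.Dict String (List String)) :
    Nat → String → PySem.Set String → PySem.Set String
  | 0, _, vis => vis
  | fuel+1, nt, vis =>
      (sd.getD nt []).foldl
        (fun vis s => if PySem.Set.contains vis s then vis else pvDfs sd fuel s vis)
        (PySem.Set.add vis nt)

def remover_simbolos_inalcancaveis_alt (gr : List (String × List String)) : List (String × List String) :=
  let sd := pvBSucc gr
  let alc := pvDfs sd (sd.values.flatten.length + 2) "S" PySem.Set.empty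
  (PySem.Dict.ofList gr).items.filter (fun p => PySem.Set.contains alc p.1)

-- ===== PRECONDITION & SPEC =====
def Spec_remover_simbolos_inalcancaveis (gr : List (String × List String)) (out : List (String × List String)) : Prop := out = remover_simbolos_inalcancaveis_alt gr
instance (gr : List (String × List String)) (out : List (String × List String)) : Decidable (Spec_remover_simbolos_inalcancaveis gr out) := by unfold Spec_remover_simbolos_inalcancaveis; infer_instance

-- ===== CLAIM (what is proved, stated in full; the proofs are below) =====
def Claim_equal_remover_simbolos_inalcancaveis : Prop := ∀ (gr : List (String × List String)), Dom_remover_simbolos_inalcancaveis gr → Spec_remover_simbolos_inalcancaveis gr (remover_simbolos_inalcancaveis gr)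

-- ===== LEMMAS AND PROOFS =====

-- the successors of a nonterminal under the grammar dict
def pvSucc (d : PySem.Dict String (List String)) (nt : String) : List String :=
  pvBSyms (d.getD nt [])

-- the specification pivot: reachability from "S" under a successor function
inductive pvReach (F : String → List String) : String → Prop
  | start : pvReach F "S"
  | step {nt s : String} : pvReach F nt → s ∈ F nt → pvReach F s

-- the inner two loops of A's scan, with the second accumulator component abstracted
def pvCharStep {β : Type} (g : β → String → β)
    (acc : PySem.Set String × β) (c : Char) : PySem.Set String × β :=
  if PySem.Chars.isupper c && !(PySem.Set.contains acc.1 (String.ofList [c])) then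
    (PySem.Set.add acc.1 (String.ofList [c]), g acc.2 (String.ofList [c]))
  else acc

def pvProdStep {β : Type} (g : β → String → β)
    (acc : PySem.Set String × β) (r : String) : PySem.Set String × β :=
  r.toList.foldl (pvCharStep g) acc

lemma pvChars_spec {β : Type} (g : β → String → β) (cs : List Char) :
    ∀ (s : PySem.Set String) (b : β), s.Nodup →
    ∃ Δ, cs.foldl (pvCharStep g) (s, b) = (s ++ Δ, Δ.foldl g b)
      ∧ (s ++ Δ).Nodup
      ∧ (∀ x ∈ Δ, x ∉ s ∧ x ∈ (cs.filter PySem.Chars.isupper).map (fun c => String.ofList [c]))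
      ∧ (∀ y ∈ (cs.filter PySem.Chars.isupper).map (fun c => String.ofList [c]), y ∈ s ++ Δ) := by
  induction cs with
  | nil => intro s b hs; exact ⟨[], by simp, by simpa using hs, by simp, by simp⟩
  | cons c t ih =>
    intro s b hs
    by_cases hup : PySem.Chars.isupper c = true
    · by_cases hm : String.ofList [c] ∈ s
      · have hstep : pvCharStep g (s, b) c = (s, b) := by
          simp [pvCharStep, hup, hm]
        obtain ⟨Δ, heq, hnd, hmem, hcov⟩ := ih s b hs
        refine ⟨Δ, by simpa [hstep] using heq, hnd, ?_, ?_⟩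
        · intro x hx
          obtain ⟨h1, h2⟩ := hmem x hx
          exact ⟨h1, by simp [hup]; right; simpa using h2⟩
        · intro y hy
          simp [hup] at hy
          rcases hy with hy | hy
          · subst hy; exact List.mem_append.mpr (Or.inl hm)
          · exact hcov y (by simpa using hy)
      · have hstep : pvCharStep g (s, b) c
            = (s ++ [String.ofList [c]], g b (String.ofList [c])) := by
          simp [pvCharStep, PySem.Set.add, hup, hm]
        have hs' : (s ++ [String.ofList [c]]).Nodup := by
          simp [List.nodup_append, hs]
          exact fun a ha h => hm (h ▸ ha)
        obtain ⟨Δ, heq, hnd, hmem, hcov⟩ := ih (s ++ [String.ofList [c]]) (g b (String.ofList [c])) hs'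
        have hsplit : s ++ String.ofList [c] :: Δ = (s ++ [String.ofList [c]]) ++ Δ := by simp
        refine ⟨String.ofList [c] :: Δ, ?_, ?_, ?_, ?_⟩
        · rw [List.foldl_cons, hstep, List.foldl_cons, hsplit]; exact heq
        · rw [hsplit]; exact hnd
        · intro x hx
          rcases List.mem_cons.mp hx with hx | hx
          · subst hx; exact ⟨hm, by simp [hup]⟩
          · obtain ⟨h1, h2⟩ := hmem x hx
            constructor
            · intro hxs; exact h1 (List.mem_append.mpr (Or.inl hxs))
            · simp [hup]; right; simpa using h2
        · intro y hy
          rw [hsplit]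
          simp only [List.filter_cons, hup, if_pos] at hy
          rcases List.mem_map.mp hy with ⟨c', hc', rfl⟩
          rcases List.mem_cons.mp hc' with h | h
          · subst h; simp
          · exact hcov _ (List.mem_map.mpr ⟨c', h, rfl⟩)
    · have hup' : PySem.Chars.isupper c = false := by simpa using hup
      have hstep : pvCharStep g (s, b) c = (s, b) := by simp [pvCharStep, hup']
      obtain ⟨Δ, heq, hnd, hmem, hcov⟩ := ih s b hs
      refine ⟨Δ, by simpa [hstep] using heq, hnd, ?_, ?_⟩
      · intro x hx
        obtain ⟨h1, h2⟩ := hmem x hx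
        exact ⟨h1, by simp [hup']; simpa using h2⟩
      · intro y hy
        simp [hup'] at hy
        exact hcov y (by simpa using hy)

lemma pvProds_spec {β : Type} (g : β → String → β) (rs : List String) :
    ∀ (s : PySem.Set String) (b : β), s.Nodup →
    ∃ Δ, rs.foldl (pvProdStep g) (s, b) = (s ++ Δ, Δ.foldl g b)
      ∧ (s ++ Δ).Nodup
      ∧ (∀ x ∈ Δ, x ∉ s ∧ x ∈ pvBSyms rs)
      ∧ (∀ y ∈ pvBSyms rs, y ∈ s ++ Δ) := by
  induction rs with
  | nil => intro s b hs; exact ⟨[], by simp, by simpa using hs, by simp, by simp [pvBSyms]⟩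
  | cons r t ih =>
    intro s b hs
    obtain ⟨Δ₁, heq₁, hnd₁, hmem₁, hcov₁⟩ := pvChars_spec g r.toList s b hs
    obtain ⟨Δ₂, heq₂, hnd₂, hmem₂, hcov₂⟩ := ih (s ++ Δ₁) (Δ₁.foldl g b) hnd₁
    have hsplit : s ++ (Δ₁ ++ Δ₂) = (s ++ Δ₁) ++ Δ₂ := by simp
    refine ⟨Δ₁ ++ Δ₂, ?_, ?_, ?_, ?_⟩
    · rw [List.foldl_cons, show pvProdStep g (s, b) r = (s ++ Δ₁, Δ₁.foldl g b) from heq₁,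
        hsplit, List.foldl_append]
      exact heq₂
    · rw [hsplit]; exact hnd₂
    · intro x hx
      rcases List.mem_append.mp hx with hx | hx
      · obtain ⟨h1, h2⟩ := hmem₁ x hx
        exact ⟨h1, by simp only [pvBSyms, List.flatMap_cons, List.mem_append]; exact Or.inl h2⟩
      · obtain ⟨h1, h2⟩ := hmem₂ x hx
        refine ⟨fun hxs => h1 (List.mem_append.mpr (Or.inl hxs)), ?_⟩
        simp only [pvBSyms, List.flatMap_cons, List.mem_append] at h2 ⊢
        exact Or.inr h2
    · intro y hy
      simp only [pvBSyms, List.flatMap_cons, List.mem_append] at hy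
      rw [hsplit]
      rcases hy with hy | hy
      · have := hcov₁ y hy
        exact List.mem_append.mpr (Or.inl this)
      · exact hcov₂ y (by simpa [pvBSyms] using hy)

lemma pvSucc_subset_univ (d : PySem.Dict String (List String)) (nt : String) :
    ∀ y ∈ pvSucc d nt, y ∈ pvUniv d := by
  intro y hy
  unfold pvSucc PySem.Dict.getD at hy
  cases hg : d.get? nt with
  | none => rw [hg] at hy; simp [pvBSyms] at hy
  | some rs =>
    rw [hg] at hy
    simp only [Option.getD_some] at hy
    unfold PySem.Dict.get? at hg
    rcases Option.map_eq_some_iff.mp hg with ⟨p, hfind, hp⟩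
    have hpmem : p ∈ d.items := List.mem_of_find?_eq_some hfind
    simp only [pvBSyms, List.mem_flatMap] at hy
    rcases hy with ⟨r, hr, hy⟩
    exact List.mem_flatMap.mpr ⟨p, hpmem, List.mem_flatMap.mpr ⟨r, hp ▸ hr, hy⟩⟩

lemma pvReach_mem (F : String → List String) (X : List String)
    (hS : "S" ∈ X) (hcl : ∀ nt ∈ X, ∀ y ∈ F nt, y ∈ X) :
    ∀ x, pvReach F x → x ∈ X := by
  intro x h
  induction h with
  | start => exact hS
  | step hr hm ih => exact hcl _ ih _ hm

lemma pvNodupLen (l1 l2 : List String) (h : l1.Nodup) (hs : ∀ x ∈ l1, x ∈ l2) :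
    l1.length ≤ l2.length := by
  calc l1.length = l1.toFinset.card := (List.toFinset_card_of_nodup h).symm
    _ ≤ l2.toFinset.card := Finset.card_le_card (fun x hx => by
        simp only [List.mem_toFinset] at *; exact hs x hx)
    _ ≤ l2.length := l2.toFinset_card_le

lemma pvFoldTrue (Δ : List String) : ∀ b : Bool, Δ.foldl (fun _ _ => true) b = (b || !Δ.isEmpty) := by
  induction Δ with
  | nil => simp
  | cons x t ih => intro b; simp [ih]

-- one round of A's while-loop over the snapshot list nts
lemma pvScan_spec (d : PySem.Dict String (List String)) (nts : List String) :
    ∀ (s : PySem.Set String) (b : Bool), s.Nodup →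
    ∃ Δ, nts.foldl (pvScanA d) (s, b) = (s ++ Δ, b || !Δ.isEmpty)
      ∧ (s ++ Δ).Nodup
      ∧ (∀ x ∈ Δ, x ∉ s ∧ ∃ nt ∈ nts, x ∈ pvSucc d nt)
      ∧ (∀ nt ∈ nts, ∀ y ∈ pvSucc d nt, y ∈ s ++ Δ) := by
  induction nts with
  | nil => intro s b hs; exact ⟨[], by simp, by simpa using hs, by simp, by simp⟩
  | cons nt t ih =>
    intro s b hs
    cases hg : d.get? nt with
    | none =>
      have hstep : pvScanA d (s, b) nt = (s, b) := by simp [pvScanA, hg]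
      obtain ⟨Δ, heq, hnd, hmem, hcov⟩ := ih s b hs
      have hsucc : pvSucc d nt = [] := by
        simp [pvSucc, PySem.Dict.getD, hg, pvBSyms]
      refine ⟨Δ, by simpa [hstep] using heq, hnd, ?_, ?_⟩
      · intro x hx
        obtain ⟨h1, nt', hnt', h2⟩ := hmem x hx
        exact ⟨h1, nt', List.mem_cons_of_mem _ hnt', h2⟩
      · intro nt' hnt' y hy
        rcases List.mem_cons.mp hnt' with h | h
        · subst h; rw [hsucc] at hy; simp at hy
        · exact hcov nt' h y hy
    | some rs =>
      have hstep : pvScanA d (s, b) nt = rs.foldl (pvProdStep (fun _ _ => true)) (s, b) := by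
        simp only [pvScanA, hg]; rfl
      have hsucc : pvSucc d nt = pvBSyms rs := by
        simp [pvSucc, PySem.Dict.getD, hg]
      obtain ⟨Δ₁, heq₁, hnd₁, hmem₁, hcov₁⟩ := pvProds_spec (fun _ _ => true) rs s b hs
      obtain ⟨Δ₂, heq₂, hnd₂, hmem₂, hcov₂⟩ := ih (s ++ Δ₁) (b || !Δ₁.isEmpty) hnd₁
      have hsplit : s ++ (Δ₁ ++ Δ₂) = (s ++ Δ₁) ++ Δ₂ := by simp
      have hbool : ((b || !Δ₁.isEmpty || !Δ₂.isEmpty : Bool)) = ((b || !(Δ₁ ++ Δ₂).isEmpty : Bool)) := by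
        cases Δ₁ <;> cases Δ₂ <;> simp
      refine ⟨Δ₁ ++ Δ₂, ?_, ?_, ?_, ?_⟩
      · rw [List.foldl_cons, hstep, heq₁, pvFoldTrue, hsplit, heq₂, hbool]
      · rw [hsplit]; exact hnd₂
      · intro x hx
        rcases List.mem_append.mp hx with hx | hx
        · obtain ⟨h1, h2⟩ := hmem₁ x hx
          exact ⟨h1, nt, List.mem_cons_self .., hsucc ▸ h2⟩
        · obtain ⟨h1, nt', hnt', h2⟩ := hmem₂ x hx
          exact ⟨fun hxs => h1 (List.mem_append.mpr (Or.inl hxs)),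
            nt', List.mem_cons_of_mem _ hnt', h2⟩
      · intro nt' hnt' y hy
        rw [hsplit]
        rcases List.mem_cons.mp hnt' with h | h
        · subst h
          exact List.mem_append.mpr (Or.inl (hcov₁ y (hsucc ▸ hy)))
        · exact hcov₂ nt' h y hy

lemma pvWhileA_spec (d : PySem.Dict String (List String)) :
    ∀ (fuel : Nat) (alc : PySem.Set String), alc.Nodup → "S" ∈ alc →
    (∀ x ∈ alc, x ∈ ("S" :: pvUniv d)) → (∀ x ∈ alc, pvReach (pvSucc d) x) →
    (pvUniv d).length + 2 ≤ alc.length + fuel →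
    (∀ x ∈ alc, x ∈ pvWhileA d fuel alc) ∧ (∀ x ∈ pvWhileA d fuel alc, pvReach (pvSucc d) x) ∧
    ("S" ∈ pvWhileA d fuel alc) ∧
    (∀ nt ∈ pvWhileA d fuel alc, ∀ y ∈ pvSucc d nt, y ∈ pvWhileA d fuel alc) := by
  intro fuel
  induction fuel with
  | zero =>
    intro alc hnd hS hU hsound hlen
    exfalso
    have hle := pvNodupLen alc ("S" :: pvUniv d) hnd hU
    simp only [List.length_cons] at hle
    omega
  | succ fuel ih =>
    intro alc hnd hS hU hsound hlen
    obtain ⟨Δ, heq, hnd', hmem, hcov⟩ := pvScan_spec d alc alc false hnd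
    by_cases hE : Δ = []
    · subst hE
      have hres : pvWhileA d (fuel+1) alc = alc := by
        simp [pvWhileA, heq]
      rw [hres]
      refine ⟨fun x hx => hx, hsound, hS, ?_⟩
      intro nt hnt y hy
      simpa using hcov nt hnt y hy
    · have hres : pvWhileA d (fuel+1) alc = pvWhileA d fuel (alc ++ Δ) := by
        have : Δ.isEmpty = false := by simpa [List.isEmpty_iff] using hE
        simp [pvWhileA, heq, this]
      have hS' : "S" ∈ alc ++ Δ := List.mem_append.mpr (Or.inl hS)
      have hU' : ∀ x ∈ alc ++ Δ, x ∈ ("S" :: pvUniv d) := by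
        intro x hx
        rcases List.mem_append.mp hx with hx | hx
        · exact hU x hx
        · obtain ⟨-, nt, -, h2⟩ := hmem x hx
          exact List.mem_cons_of_mem _ (pvSucc_subset_univ d nt x h2)
      have hsound' : ∀ x ∈ alc ++ Δ, pvReach (pvSucc d) x := by
        intro x hx
        rcases List.mem_append.mp hx with hx | hx
        · exact hsound x hx
        · obtain ⟨-, nt, hnt, h2⟩ := hmem x hx
          exact pvReach.step (hsound nt hnt) h2
      have hlen' : (pvUniv d).length + 2 ≤ (alc ++ Δ).length + fuel := by
        have : 1 ≤ Δ.length := List.length_pos_iff.mpr hE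
        simp only [List.length_append]
        omega
      obtain ⟨c1, c2, c3, c4⟩ := ih (alc ++ Δ) hnd' hS' hU' hsound' hlen'
      rw [hres]
      exact ⟨fun x hx => c1 x (List.mem_append.mpr (Or.inl hx)), c2, c3, c4⟩

-- B's successor dict looks up exactly pvSucc of the grammar dict
lemma pvBSucc_items (gr : List (String × List String)) :
    (pvBSucc gr).items
      = (PySem.Dict.ofList gr).items.map (fun p => (p.1, pvBSyms p.2)) := by
  unfold pvBSucc
  have h := PySem.Dict.items_foldl_insert_fresh (l := (PySem.Dict.ofList gr).items)
      (k := fun p => p.1) (v := fun p => pvBSyms p.2) (d := PySem.Dict.empty)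
      (by intro a _; exact PySem.Dict.contains_empty a.1)
      (PySem.Dict.nodup_keys_ofList gr)
  simpa [PySem.Dict.items] using h

lemma pvBSucc_getD (gr : List (String × List String)) (nt : String) :
    (pvBSucc gr).getD nt [] = pvSucc (PySem.Dict.ofList gr) nt := by
  have hitems := pvBSucc_items gr
  have hknd : (PySem.Dict.ofList gr).keys.Nodup := PySem.Dict.nodup_keys_ofList gr
  have hknd' : (pvBSucc gr).keys.Nodup := by
    simp only [PySem.Dict.keys, hitems, List.map_map]
    simpa [PySem.Dict.keys, Function.comp] using hknd
  cases hg : (PySem.Dict.ofList gr).get? nt with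
  | none =>
    have hnk : nt ∉ (PySem.Dict.ofList gr).keys :=
      (PySem.Dict.get?_eq_none_iff_not_mem_keys _ nt).mp hg
    have hnk' : nt ∉ (pvBSucc gr).keys := by
      simp only [PySem.Dict.keys, hitems, List.map_map]
      simpa [PySem.Dict.keys, Function.comp] using hnk
    have hnc : (pvBSucc gr).contains nt = false := by
      rw [← Bool.not_eq_true]
      intro hc
      exact hnk' ((PySem.Dict.contains_iff_mem_keys _ nt).mp hc)
    rw [PySem.Dict.getD_of_not_contains _ ([] : List String) hnc]
    simp [pvSucc, PySem.Dict.getD, hg, pvBSyms]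
  | some rs =>
    have hmem : (nt, rs) ∈ (PySem.Dict.ofList gr).items :=
      PySem.Dict.mem_items_of_get?_eq_some _ hg
    have hmem' : (nt, pvBSyms rs) ∈ (pvBSucc gr).items := by
      rw [hitems]
      exact List.mem_map.mpr ⟨(nt, rs), hmem, rfl⟩
    rw [PySem.Dict.getD_of_mem_items _ hmem' hknd' ([] : List String)]
    simp [pvSucc, PySem.Dict.getD, hg]

lemma pvGetD_subset_flatten (sd : PySem.Dict String (List String)) (nt : String) :
    ∀ y ∈ sd.getD nt [], y ∈ sd.values.flatten := by
  intro y hy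
  unfold PySem.Dict.getD at hy
  cases hg : sd.get? nt with
  | none => rw [hg] at hy; simp at hy
  | some vs =>
    rw [hg] at hy
    simp only [Option.getD_some] at hy
    unfold PySem.Dict.get? at hg
    rcases Option.map_eq_some_iff.mp hg with ⟨p, hfind, hp⟩
    have hpmem : p ∈ sd.items := List.mem_of_find?_eq_some hfind
    exact List.mem_flatten.mpr ⟨vs, by
      simp only [PySem.Dict.values]
      exact List.mem_map.mpr ⟨p, hpmem, hp⟩, hy⟩

-- B's DFS: with enough fuel the call on an unvisited reachable nt returns the visited set
-- extended by nt and further reachable symbols, closed under successors for every new symbol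
lemma pvDfs_spec (sd : PySem.Dict String (List String)) :
    ∀ (fuel : Nat) (nt : String) (vis : PySem.Set String), vis.Nodup →
    (∀ x ∈ vis, x ∈ ("S" :: sd.values.flatten)) →
    (∀ x ∈ vis, pvReach (fun m => sd.getD m []) x) →
    pvReach (fun m => sd.getD m []) nt → nt ∈ ("S" :: sd.values.flatten) → nt ∉ vis →
    ("S" :: sd.values.flatten).length ≤ vis.length + fuel →
    ∃ Δ, pvDfs sd fuel nt vis = vis ++ Δ
      ∧ (vis ++ Δ).Nodup
      ∧ nt ∈ Δ
      ∧ (∀ x ∈ Δ, x ∈ ("S" :: sd.values.flatten) ∧ pvReach (fun m => sd.getD m []) x)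
      ∧ (∀ x ∈ Δ, ∀ y ∈ sd.getD x [], y ∈ vis ++ Δ) := by
  intro fuel
  induction fuel with
  | zero =>
    intro nt vis hnd hU hsound hrnt hUnt hnv hlen
    exfalso
    have hle := pvNodupLen (vis ++ [nt]) ("S" :: sd.values.flatten)
      (by simp [List.nodup_append, hnd]
          exact fun a ha h => hnv (h ▸ ha))
      (by intro x hx
          rcases List.mem_append.mp hx with hx | hx
          · exact hU x hx
          · simp at hx; subst hx; exact hUnt)
    simp only [List.length_append, List.length_cons] at hle hlen
    omega
  | succ fuel ih =>
    intro nt vis hnd hU hsound hrnt hUnt hnv hlen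
    have hadd : PySem.Set.add vis nt = vis ++ [nt] := PySem.Set.add_of_not_mem hnv
    -- the inner fold over the successor list, by induction on that list
    have hfold : ∀ (cs : List String) (acc : PySem.Set String), acc.Nodup →
        (∀ x ∈ acc, x ∈ ("S" :: sd.values.flatten)) →
        (∀ x ∈ acc, pvReach (fun m => sd.getD m []) x) →
        (∀ c ∈ cs, pvReach (fun m => sd.getD m []) c ∧ c ∈ ("S" :: sd.values.flatten)) →
        ("S" :: sd.values.flatten).length ≤ acc.length + fuel →
        ∃ Δ, cs.foldl (fun vis s => if PySem.Set.contains vis s then vis else pvDfs sd fuel s vis) acc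
              = acc ++ Δ
          ∧ (acc ++ Δ).Nodup
          ∧ (∀ x ∈ Δ, x ∈ ("S" :: sd.values.flatten) ∧ pvReach (fun m => sd.getD m []) x)
          ∧ (∀ x ∈ Δ, ∀ y ∈ sd.getD x [], y ∈ acc ++ Δ)
          ∧ (∀ c ∈ cs, c ∈ acc ++ Δ) := by
      intro cs
      induction cs with
      | nil => intro acc hnd' hU' hsound' _ _; exact ⟨[], by simp, by simpa using hnd', by simp, by simp, by simp⟩
      | cons c t iht =>
        intro acc hnd' hU' hsound' hcs hlen'
        by_cases hc : c ∈ acc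
        · have hstep : (if PySem.Set.contains acc c then acc
              else pvDfs sd fuel c acc) = acc := by
            simp [hc]
          obtain ⟨Δ, heq, h1, h2, h3, h4⟩ := iht acc hnd' hU' hsound'
            (fun x hx => hcs x (List.mem_cons_of_mem _ hx)) hlen'
          refine ⟨Δ, by rw [List.foldl_cons, hstep]; exact heq, h1, h2, h3, ?_⟩
          intro c' hc'
          rcases List.mem_cons.mp hc' with h | h
          · subst h; exact List.mem_append.mpr (Or.inl hc)
          · exact h4 c' h
        · have hstep : (if PySem.Set.contains acc c then acc
              else pvDfs sd fuel c acc) = pvDfs sd fuel c acc := by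
            simp [hc]
          obtain ⟨hr, hUc⟩ := hcs c (List.mem_cons_self ..)
          obtain ⟨Δ₁, heq₁, hnd₁, hntΔ₁, hΔ₁, hcl₁⟩ := ih c acc hnd' hU' hsound' hr hUc hc hlen'
          have hU₁ : ∀ x ∈ acc ++ Δ₁, x ∈ ("S" :: sd.values.flatten) := by
            intro x hx
            rcases List.mem_append.mp hx with hx | hx
            · exact hU' x hx
            · exact (hΔ₁ x hx).1
          have hsound₁ : ∀ x ∈ acc ++ Δ₁, pvReach (fun m => sd.getD m []) x := by
            intro x hx
            rcases List.mem_append.mp hx with hx | hx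
            · exact hsound' x hx
            · exact (hΔ₁ x hx).2
          have hlen₁ : ("S" :: sd.values.flatten).length ≤ (acc ++ Δ₁).length + fuel := by
            simp only [List.length_append]; omega
          obtain ⟨Δ₂, heq₂, h1, h2, h3, h4⟩ := iht (acc ++ Δ₁) hnd₁ hU₁ hsound₁
            (fun x hx => hcs x (List.mem_cons_of_mem _ hx)) hlen₁
          have hsplit : acc ++ (Δ₁ ++ Δ₂) = (acc ++ Δ₁) ++ Δ₂ := by simp
          refine ⟨Δ₁ ++ Δ₂, ?_, ?_, ?_, ?_, ?_⟩
          · rw [List.foldl_cons, hstep, heq₁, heq₂, hsplit]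
          · rw [hsplit]; exact h1
          · intro x hx
            rcases List.mem_append.mp hx with hx | hx
            · exact hΔ₁ x hx
            · exact h2 x hx
          · intro x hx y hy
            rw [hsplit]
            rcases List.mem_append.mp hx with hx | hx
            · exact List.mem_append.mpr (Or.inl (hcl₁ x hx y hy))
            · exact h3 x hx y hy
          · intro c' hc'
            rw [hsplit]
            rcases List.mem_cons.mp hc' with h | h
            · subst h
              exact List.mem_append.mpr (Or.inl (List.mem_append.mpr (Or.inr hntΔ₁)))
            · exact h4 c' h
    have hacc0nd : (vis ++ [nt]).Nodup := by
      simp [List.nodup_append, hnd]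
      exact fun a ha h => hnv (h ▸ ha)
    have hacc0U : ∀ x ∈ vis ++ [nt], x ∈ ("S" :: sd.values.flatten) := by
      intro x hx
      rcases List.mem_append.mp hx with hx | hx
      · exact hU x hx
      · simp at hx; subst hx; exact hUnt
    have hacc0r : ∀ x ∈ vis ++ [nt], pvReach (fun m => sd.getD m []) x := by
      intro x hx
      rcases List.mem_append.mp hx with hx | hx
      · exact hsound x hx
      · simp at hx; subst hx; exact hrnt
    have hcs0 : ∀ c ∈ sd.getD nt [], pvReach (fun m => sd.getD m []) c ∧ c ∈ ("S" :: sd.values.flatten) := by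
      intro c hc
      exact ⟨pvReach.step hrnt hc, List.mem_cons_of_mem _ (pvGetD_subset_flatten sd nt c hc)⟩
    have hlen0 : ("S" :: sd.values.flatten).length ≤ (vis ++ [nt]).length + fuel := by
      simp only [List.length_append, List.length_cons] at hlen ⊢
      omega
    obtain ⟨Δ₂, heq, h1, h2, h3, h4⟩ := hfold (sd.getD nt []) (vis ++ [nt])
      hacc0nd hacc0U hacc0r hcs0 hlen0
    have hsplit : vis ++ (nt :: Δ₂) = (vis ++ [nt]) ++ Δ₂ := by simp
    refine ⟨nt :: Δ₂, ?_, ?_, List.mem_cons_self .., ?_, ?_⟩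
    · show (sd.getD nt []).foldl _ (PySem.Set.add vis nt) = _
      rw [hadd, heq, hsplit]
    · rw [hsplit]; exact h1
    · intro x hx
      rcases List.mem_cons.mp hx with hx | hx
      · subst hx; exact ⟨hUnt, hrnt⟩
      · exact h2 x hx
    · intro x hx y hy
      rw [hsplit]
      rcases List.mem_cons.mp hx with hx | hx
      · subst hx; exact h4 y hy
      · exact h3 x hx y hy

-- ===== VERDICT (by name: the statement is the Claim_ definition above) =====
theorem remover_simbolos_inalcancaveis_spec : Claim_equal_remover_simbolos_inalcancaveis := by
  intro gr _hdom
  unfold Spec_remover_simbolos_inalcancaveis remover_simbolos_inalcancaveis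
    remover_simbolos_inalcancaveis_alt
  set d := PySem.Dict.ofList gr with hd
  set sd := pvBSucc gr with hsd
  have hF : (fun m => sd.getD m []) = pvSucc d := by
    funext m; exact pvBSucc_getD gr m
  have hlenA : (pvUniv d).length + 2 ≤ (["S"] : List String).length + ((pvUniv d).length + 2) := by
    simp
  obtain ⟨a1, a2, a3, a4⟩ := pvWhileA_spec d ((pvUniv d).length + 2) ["S"]
    (by simp) (by simp) (by intro x hx; simpa using List.mem_cons.mpr (Or.inl (by simpa using hx)))
    (by intro x hx; simp at hx; subst hx; exact pvReach.start) hlenA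
  obtain ⟨Δ, hbeq, bnd, bS, bsound, bcl⟩ := pvDfs_spec sd (sd.values.flatten.length + 2) "S" []
    (by simp) (by simp) (by simp) pvReach.start (List.mem_cons_self ..) (by simp)
    (by simp)
  rw [hF] at bsound
  have hinitA : PySem.Set.add PySem.Set.empty "S" = (["S"] : List String) := rfl
  rw [hinitA]
  apply List.filter_congr
  intro p _hp
  rw [Bool.eq_iff_iff]
  simp only [PySem.Set.contains_iff]
  rw [show (PySem.Set.empty : PySem.Set String) = ([] : List String) from rfl, hbeq]
  simp only [List.nil_append] at *
  have bcl' : ∀ x ∈ Δ, ∀ y ∈ pvSucc d x, y ∈ Δ := by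
    intro x hx y hy
    refine bcl x hx y ?_
    rw [show sd.getD x [] = pvSucc d x from congrFun hF x]
    exact hy
  constructor
  · intro h
    exact pvReach_mem (pvSucc d) Δ bS bcl' p.1 (a2 p.1 h)
  · intro h
    exact pvReach_mem (pvSucc d) _ a3 a4 p.1 ((bsound p.1 h).2)
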